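-- pv_equiv track=rewrite | github.com/Jenavla/Physics-Calculator | Physics_calculator_functions.py | compact_signs
-- ===== SOURCE A (Python) =====
-- def compact_signs(number_str):
--     # continue looping until no more consecutive plus or minus signs are found
--     while True:
--         # Replace consecutive double minus signs with a single plus sign
--         # Replace combinations of plus and minus signs with a single minus sign
--         new_str = number_str.replace("--", "+").replace("+-", "-").replace("-+", "-").replace("++", "+")
--
--         # if the modified string is the same as the original string, exit the loop
--         if new_str == number_str:
--             break
--
--         # Update the original string with the modified one for the next iteration
--         number_str = new_str
--
--     # after handling consecutive signs, check the count of plus and minus signs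
--     if number_str.count('+') > 1:
--         # if there are more than one plus signs, simplify to a single plus sign
--         number_str = '+'
--     elif number_str.count('-') > 1:
--         # if there are more than one minus signs, simplify to a single minus sign
--         number_str = '-'
--
--     # Return the simplified number string
--     return number_str
-- ===== SOURCE B (Python) =====
-- def compact_signs(number_str):
--     # Single left-to-right scan: collapse each maximal run of consecutive sign
--     # characters into one sign determined by the minus-count parity of the run,
--     # then the same more-than-one-sign check as the original.
--     out = []
--     pending = None  # minus-parity of the current sign run, or None
--     for c in number_str:
--         if c == '+' or c == '-':
--             m = (c == '-')
--             pending = m if pending is None else (pending != m)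
--         else:
--             if pending is not None:
--                 out.append('-' if pending else '+')
--                 pending = None
--             out.append(c)
--     if pending is not None:
--         out.append('-' if pending else '+')
--     res = ''.join(out)
--     if res.count('+') > 1:
--         return '+'
--     if res.count('-') > 1:
--         return '-'
--     return res
-- ===== Notes on version B (the rewrite author's own statement) =====
-- stated objective: alternative
-- what changed: A repeatedly rescans and rewrites the whole string with four chained replace passes until it stops changing; B collapses each maximal run of consecutive sign characters in a single linear scan using the minus-count parity of the run, then applies the same more-than-one-sign check.
import Mathlib
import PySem

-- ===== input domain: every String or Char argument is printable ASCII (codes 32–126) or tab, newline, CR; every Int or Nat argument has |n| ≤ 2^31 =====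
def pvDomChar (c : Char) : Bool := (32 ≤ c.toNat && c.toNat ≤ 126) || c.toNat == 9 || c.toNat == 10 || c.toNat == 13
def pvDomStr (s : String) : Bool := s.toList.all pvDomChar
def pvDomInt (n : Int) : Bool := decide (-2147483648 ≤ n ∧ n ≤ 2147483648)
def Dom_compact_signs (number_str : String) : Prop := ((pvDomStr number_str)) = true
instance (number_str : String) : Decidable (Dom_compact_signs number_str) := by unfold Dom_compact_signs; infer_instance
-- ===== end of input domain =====

-- B collapses every maximal run of consecutive sign characters in ONE linear scan, by the
-- minus-count parity of the run, instead of A's repeated whole-string replace passes until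
-- a fixpoint; same final more-than-one-sign check.

-- ===== PORT A =====
-- pvRepl2 a b r is s.replace("ab", "r") as a structural recursion; it and the lemmas up to
-- pvStepA_eq_or_lt are needed ABOVE the port because pvLoopA cites pvStepA_eq_or_lt for termination.
def pvRepl2 (a b r : Char) : List Char → List Char
  | [] => []
  | [c] => [c]
  | c :: d :: t =>
    if c = a ∧ d = b then r :: pvRepl2 a b r t
    else c :: pvRepl2 a b r (d :: t)

theorem pvRepl2_go (a b r : Char) :
    ∀ (fuel : Nat) (l acc : List Char), l.length ≤ fuel →
      PySem.Chars.replace.go [a,b] [r] fuel l acc = acc.reverse ++ pvRepl2 a b r l := by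
  intro fuel
  induction fuel with
  | zero =>
    intro l acc h
    have : l = [] := List.eq_nil_of_length_eq_zero (Nat.le_zero.mp h)
    subst this
    simp [PySem.Chars.replace.go, pvRepl2]
  | succ n ih =>
    intro l acc h
    match l with
    | [] => simp [PySem.Chars.replace.go, pvRepl2]
    | [c] =>
      rw [PySem.Chars.replace.go]
      simp only [List.isPrefixOf]
      simp [pvRepl2, ih [] (c :: acc) (by simp)]
    | c :: d :: t =>
      rw [PySem.Chars.replace.go]
      simp only [List.isPrefixOf, Bool.and_true]
      cases hcd : (a == c && b == d) with
      | true =>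
        simp only [Bool.and_eq_true, beq_iff_eq] at hcd
        obtain ⟨rfl, rfl⟩ := hcd
        simp only [if_pos]
        rw [show List.drop [a,b].length (a :: b :: t) = t from rfl,
            show ([r] : List Char).reverse ++ acc = r :: acc from rfl]
        rw [ih t (r :: acc) (by simp at h ⊢; omega)]
        simp [pvRepl2]
      | false =>
        have hne : ¬(c = a ∧ d = b) := by
          rintro ⟨rfl, rfl⟩; simp at hcd
        simp only [Bool.false_eq_true, if_false]
        rw [ih (d :: t) (c :: acc) (by simp at h ⊢; omega)]
        simp [pvRepl2, if_neg hne]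

theorem pvReplace_eq_repl2 (a b r : Char) (s : List Char) :
    PySem.Chars.replace s [a,b] [r] = pvRepl2 a b r s := by
  rw [PySem.Chars.replace]
  simp [pvRepl2_go a b r s.length s [] le_rfl]

theorem pvRepl2_length_le (a b r : Char) (l : List Char) :
    (pvRepl2 a b r l).length ≤ l.length := by
  induction l using pvRepl2.induct a b with
  | case1 => simp [pvRepl2]
  | case2 c => simp [pvRepl2]
  | case3 c d t hc ih => rw [pvRepl2, if_pos hc]; simp at ih ⊢; omega
  | case4 c d t hc ih => rw [pvRepl2, if_neg hc]; simp at ih ⊢; omega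

theorem pvRepl2_eq_or_lt (a b r : Char) (l : List Char) :
    pvRepl2 a b r l = l ∨ (pvRepl2 a b r l).length < l.length := by
  induction l using pvRepl2.induct a b with
  | case1 => left; rfl
  | case2 c => left; rfl
  | case3 c d t hc ih =>
    right
    rw [pvRepl2, if_pos hc]
    have hle := pvRepl2_length_le a b r t
    simp; omega
  | case4 c d t hc ih =>
    rw [pvRepl2, if_neg hc]
    rcases ih with h | h
    · left; rw [h]
    · right; simp at h ⊢; omega

def pvStepA (s : List Char) : List Char :=
  PySem.Chars.replace (PySem.Chars.replace (PySem.Chars.replace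
    (PySem.Chars.replace s ['-','-'] ['+']) ['+','-'] ['-']) ['-','+'] ['-']) ['+','+'] ['+']

theorem pvStepA_eq_or_lt (s : List Char) :
    pvStepA s = s ∨ (pvStepA s).length < s.length := by
  unfold pvStepA
  rw [pvReplace_eq_repl2, pvReplace_eq_repl2, pvReplace_eq_repl2, pvReplace_eq_repl2]
  rcases pvRepl2_eq_or_lt '-' '-' '+' s with h1 | h1 <;>
  rcases pvRepl2_eq_or_lt '+' '-' '-' (pvRepl2 '-' '-' '+' s) with h2 | h2 <;>
  rcases pvRepl2_eq_or_lt '-' '+' '-' (pvRepl2 '+' '-' '-' (pvRepl2 '-' '-' '+' s)) with h3 | h3 <;>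
  rcases pvRepl2_eq_or_lt '+' '+' '+' (pvRepl2 '-' '+' '-' (pvRepl2 '+' '-' '-' (pvRepl2 '-' '-' '+' s))) with h4 | h4
  · left; rw [h4, h3, h2, h1]
  all_goals right
  all_goals (try replace h1 := congrArg List.length h1)
  all_goals (try replace h2 := congrArg List.length h2)
  all_goals (try replace h3 := congrArg List.length h3)
  all_goals (try replace h4 := congrArg List.length h4)
  all_goals omega

-- the 'while True' loop of A: apply the four replaces until the string stops changing
def pvLoopA (s : List Char) : List Char :=
  let n := pvStepA s
  if h : n = s then s else pvLoopA n
termination_by s.length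
decreasing_by
  rcases pvStepA_eq_or_lt s with h' | h'
  · exact absurd h' h
  · exact h'

def compact_signs (number_str : String) : String :=
  let r := pvLoopA number_str.toList
  if PySem.Chars.count r ['+'] > 1 then "+"
  else if PySem.Chars.count r ['-'] > 1 then "-"
  else String.ofList r

-- ===== PORT B =====
def pvSgn (p : Bool) : Char := if p then '-' else '+'

-- loop body of Source B: state = (out, pending minus-parity of the current sign run)
def pvStepB (st : List Char × Option Bool) (c : Char) : List Char × Option Bool :=
  if c == '+' || c == '-' then
    let m := c == '-'
    (st.1, some (match st.2 with | none => m | some p => p != m))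
  else
    match st.2 with
    | none => (st.1 ++ [c], none)
    | some p => ((st.1 ++ [pvSgn p]) ++ [c], none)

def compact_signs_alt (number_str : String) : String :=
  let st := number_str.toList.foldl pvStepB ([], none)
  let res := match st.2 with | none => st.1 | some p => st.1 ++ [pvSgn p]
  if PySem.Chars.count res ['+'] > 1 then "+"
  else if PySem.Chars.count res ['-'] > 1 then "-"
  else String.ofList res

-- ===== PRECONDITION & SPEC =====
def Spec_compact_signs (number_str : String) (out : String) : Prop := out = compact_signs_alt number_str
instance (number_str : String) (out : String) : Decidable (Spec_compact_signs number_str out) := by unfold Spec_compact_signs; infer_instance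

-- ===== CLAIM (what is proved, stated in full; the proofs are below) =====
def Claim_equal_compact_signs : Prop := ∀ (number_str : String), Dom_compact_signs number_str → Spec_compact_signs number_str (compact_signs number_str)

-- ===== LEMMAS AND PROOFS =====
def pvIsSign (c : Char) : Bool := c == '+' || c == '-'

-- recursive form of B's scan: state = pending minus-parity of the current sign run
def pvGoC : Option Bool → List Char → List Char
  | none, [] => []
  | some p, [] => [pvSgn p]
  | none, c :: t => if pvIsSign c then pvGoC (some (c == '-')) t else c :: pvGoC none t
  | some p, c :: t => if pvIsSign c then pvGoC (some (p != (c == '-'))) t else pvSgn p :: c :: pvGoC none t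

-- B's foldl produces pvGoC's output appended to the accumulator
theorem pvFoldB (l : List Char) : ∀ (acc : List Char) (p : Option Bool),
    (match (l.foldl pvStepB (acc, p)).2 with
      | none => (l.foldl pvStepB (acc, p)).1
      | some q => (l.foldl pvStepB (acc, p)).1 ++ [pvSgn q]) = acc ++ pvGoC p l := by
  induction l with
  | nil =>
    intro acc p
    cases p <;> simp [pvGoC]
  | cons c t ih =>
    intro acc p
    simp only [List.foldl_cons]
    by_cases hs : (c == '+' || c == '-') = true
    · cases p with
      | none =>
        rw [show pvStepB (acc, none) c = (acc, some (c == '-')) by simp [pvStepB, hs]]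
        rw [ih acc (some (c == '-'))]
        simp [pvGoC, pvIsSign, hs]
      | some q =>
        rw [show pvStepB (acc, some q) c = (acc, some (q != (c == '-'))) by simp [pvStepB, hs]]
        rw [ih acc (some (q != (c == '-')))]
        simp [pvGoC, pvIsSign, hs]
    · cases p with
      | none =>
        rw [show pvStepB (acc, none) c = (acc ++ [c], none) by simp [pvStepB, hs]]
        rw [ih (acc ++ [c]) none]
        simp [pvGoC, pvIsSign, hs]
      | some q =>
        rw [show pvStepB (acc, some q) c = ((acc ++ [pvSgn q]) ++ [c], none) by simp [pvStepB, hs]]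
        rw [ih ((acc ++ [pvSgn q]) ++ [c]) none]
        simp [pvGoC, pvIsSign, hs]

theorem pvRepl2_infix_lt (a b r : Char) (l : List Char) (h : [a,b] <:+: l) :
    (pvRepl2 a b r l).length < l.length := by
  induction l using pvRepl2.induct a b with
  | case1 => simp at h
  | case2 c =>
    exfalso
    have := h.length_le
    simp at this
  | case3 c d t hc ih =>
    rw [pvRepl2, if_pos hc]
    have := pvRepl2_length_le a b r t
    simp; omega
  | case4 c d t hc ih =>
    rw [pvRepl2, if_neg hc]
    have hinf : [a,b] <:+: d :: t := by
      rcases List.infix_cons_iff.mp h with hp | hi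
      · exfalso
        rcases hp with ⟨s, hs⟩
        simp at hs
        exact hc ⟨hs.1.symm, hs.2.1.symm⟩
      · exact hi
    have := ih hinf
    simp at this ⊢; omega

theorem pvBneAssoc : ∀ u v w : Bool, (u != (v != w)) = ((u != v) != w) := by decide

-- the collapse is invariant under one parity-preserving 2-sign → 1-sign replacement
theorem pvGoC_repl2 (a b r : Char) (ha : pvIsSign a = true) (hb : pvIsSign b = true)
    (hrs : pvIsSign r = true) (hr : (r == '-') = ((a == '-') != (b == '-'))) :
    ∀ (l : List Char) (p : Option Bool), pvGoC p (pvRepl2 a b r l) = pvGoC p l := by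
  intro l
  induction l using pvRepl2.induct a b with
  | case1 => intro p; rfl
  | case2 c => intro p; rfl
  | case3 c d t hc ih =>
    obtain ⟨rfl, rfl⟩ := hc
    intro p
    rw [pvRepl2, if_pos ⟨rfl, rfl⟩]
    cases p with
    | none =>
      simp only [pvGoC, hrs, ha, hb, if_true]
      rw [ih (some (r == '-')), hr]
    | some q =>
      simp only [pvGoC, hrs, ha, hb, if_true]
      rw [ih (some (q != (r == '-'))), hr, pvBneAssoc]
  | case4 c d t hc ih =>
    intro p
    rw [pvRepl2, if_neg hc]
    by_cases hsc : pvIsSign c = true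
    · cases p with
      | none => simp only [pvGoC, hsc, if_true]; exact ih (some (c == '-'))
      | some q => simp only [pvGoC, hsc, if_true]; exact ih (some (q != (c == '-')))
    · have hsc' : pvIsSign c = false := by simpa using hsc
      cases p with
      | none => simp only [pvGoC, hsc', Bool.false_eq_true, if_false, ih none]
      | some q => simp only [pvGoC, hsc', Bool.false_eq_true, if_false, ih none]

theorem pvSignChar (c : Char) (h : pvIsSign c = true) : c = '+' ∨ c = '-' := by
  simpa [pvIsSign] using h

-- a string with no two adjacent signs is its own collapse
theorem pvGoC_fixed_aux : ∀ (n : Nat) (s : List Char), s.length ≤ n →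
    (∀ c d, [c,d] <:+: s → pvIsSign c = true → pvIsSign d = true → False) →
    pvGoC none s = s := by
  intro n
  induction n with
  | zero =>
    intro s hl _
    have : s = [] := List.eq_nil_of_length_eq_zero (Nat.le_zero.mp hl)
    subst this; rfl
  | succ n ih =>
    intro s hl h
    match s with
    | [] => rfl
    | c :: t =>
      by_cases hsc : pvIsSign c = true
      · have hcs : pvSgn (c == '-') = c := by
          rcases pvSignChar c hsc with rfl | rfl <;> rfl
        match t with
        | [] => simp only [pvGoC, hsc, if_true, hcs]
        | d :: t' =>
          have hd : pvIsSign d = false := by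
            by_contra hq
            exact h c d ⟨[], t', rfl⟩ hsc (by simpa using hq)
          simp only [pvGoC, hsc, hd, if_true, Bool.false_eq_true, if_false, hcs]
          have ht' : pvGoC none t' = t' := by
            apply ih t' (by simp at hl; omega)
            intro x y hinf hx hy
            exact h x y (hinf.trans ⟨[c,d], [], by simp⟩) hx hy
          rw [ht']
      · have hsc' : pvIsSign c = false := by simpa using hsc
        simp only [pvGoC, hsc', Bool.false_eq_true, if_false]
        have ht : pvGoC none t = t := by
          apply ih t (by simp at hl; omega)
          intro x y hinf hx hy
          exact h x y (hinf.trans (List.suffix_cons c t).isInfix) hx hy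
        rw [ht]

theorem pvGoC_fixed (s : List Char)
    (h : ∀ c d, [c,d] <:+: s → pvIsSign c = true → pvIsSign d = true → False) :
    pvGoC none s = s :=
  pvGoC_fixed_aux s.length s le_rfl h

theorem pvRepl2_id_not_infix (a b r : Char) (l : List Char)
    (h : pvRepl2 a b r l = l) : ¬ ([a,b] <:+: l) := by
  intro hinf
  have := pvRepl2_infix_lt a b r l hinf
  rw [h] at this
  omega

-- a fixed point of the four replaces has no two adjacent signs, so it is its own collapse
theorem pvStepA_fixed (s : List Char) (h : pvStepA s = s) : pvGoC none s = s := by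
  have hs : pvStepA s = pvRepl2 '+' '+' '+' (pvRepl2 '-' '+' '-' (pvRepl2 '+' '-' '-' (pvRepl2 '-' '-' '+' s))) := by
    unfold pvStepA
    rw [pvReplace_eq_repl2, pvReplace_eq_repl2, pvReplace_eq_repl2, pvReplace_eq_repl2]
  rw [hs] at h
  have l1 := pvRepl2_length_le '-' '-' '+' s
  have l2 := pvRepl2_length_le '+' '-' '-' (pvRepl2 '-' '-' '+' s)
  have l3 := pvRepl2_length_le '-' '+' '-' (pvRepl2 '+' '-' '-' (pvRepl2 '-' '-' '+' s))
  have l4 := pvRepl2_length_le '+' '+' '+' (pvRepl2 '-' '+' '-' (pvRepl2 '+' '-' '-' (pvRepl2 '-' '-' '+' s)))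
  have hlen := congrArg List.length h
  have e1 : pvRepl2 '-' '-' '+' s = s := by
    rcases pvRepl2_eq_or_lt '-' '-' '+' s with h' | h'
    · exact h'
    · omega
  rw [e1] at h l2 l3 l4 hlen
  have e2 : pvRepl2 '+' '-' '-' s = s := by
    rcases pvRepl2_eq_or_lt '+' '-' '-' s with h' | h'
    · exact h'
    · omega
  rw [e2] at h l3 l4 hlen
  have e3 : pvRepl2 '-' '+' '-' s = s := by
    rcases pvRepl2_eq_or_lt '-' '+' '-' s with h' | h'
    · exact h'
    · omega
  rw [e3] at h l4 hlen
  have e4 : pvRepl2 '+' '+' '+' s = s := h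
  apply pvGoC_fixed
  intro c d hinf hc hd
  rcases pvSignChar c hc with rfl | rfl <;> rcases pvSignChar d hd with rfl | rfl
  · exact pvRepl2_id_not_infix _ _ _ _ e4 hinf
  · exact pvRepl2_id_not_infix _ _ _ _ e2 hinf
  · exact pvRepl2_id_not_infix _ _ _ _ e3 hinf
  · exact pvRepl2_id_not_infix _ _ _ _ e1 hinf

theorem pvGoC_stepA (s : List Char) (p : Option Bool) : pvGoC p (pvStepA s) = pvGoC p s := by
  unfold pvStepA
  rw [pvReplace_eq_repl2, pvReplace_eq_repl2, pvReplace_eq_repl2, pvReplace_eq_repl2]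
  rw [pvGoC_repl2 '+' '+' '+' (by decide) (by decide) (by decide) (by decide)]
  rw [pvGoC_repl2 '-' '+' '-' (by decide) (by decide) (by decide) (by decide)]
  rw [pvGoC_repl2 '+' '-' '-' (by decide) (by decide) (by decide) (by decide)]
  rw [pvGoC_repl2 '-' '-' '+' (by decide) (by decide) (by decide) (by decide)]

theorem pvLoopA_eq_goC_aux : ∀ (n : Nat) (s : List Char), s.length ≤ n →
    pvLoopA s = pvGoC none s := by
  intro n
  induction n with
  | zero =>
    intro s hl
    have : s = [] := List.eq_nil_of_length_eq_zero (Nat.le_zero.mp hl)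
    subst this
    rw [pvLoopA, dif_pos (show pvStepA [] = [] from rfl)]
    rfl
  | succ n ih =>
    intro s hl
    rw [pvLoopA]
    by_cases h : pvStepA s = s
    · rw [dif_pos h]
      exact (pvStepA_fixed s h).symm
    · rw [dif_neg h]
      have hlt : (pvStepA s).length < s.length := by
        rcases pvStepA_eq_or_lt s with h' | h'
        · exact absurd h' h
        · exact h'
      rw [ih (pvStepA s) (by omega)]
      exact pvGoC_stepA s none

theorem pvLoopA_eq_goC (s : List Char) : pvLoopA s = pvGoC none s :=
  pvLoopA_eq_goC_aux s.length s le_rfl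

-- ===== VERDICT (by name: the statement is the Claim_ definition above) =====
theorem compact_signs_spec : Claim_equal_compact_signs := by
  intro s _
  unfold Spec_compact_signs compact_signs compact_signs_alt
  have hb := pvFoldB s.toList [] none
  simp only [List.nil_append] at hb
  simp only [pvLoopA_eq_goC, hb]
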